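-- pv_equiv track=rewrite | github.com/mattcallaway/CampaignInABox | engine/file_fingerprinting/fingerprint_classifier.py | _fuzzy_header_match
-- ===== SOURCE A (Python) =====
-- def _fuzzy_header_match(pattern: str, normalized_headers: set[str]) -> bool:
--     """
--     Match a rule pattern against the set of normalized file headers.
--
--     Matching strategies (in order):
--     1. Exact match after normalization
--     2. Pattern is a substring of any header
--     3. All words in pattern appear in any single header
--     """
--     pattern = pattern.lower().strip()
--     pattern_words = set(pattern.split())
--
--     for h in normalized_headers:
--         # Exact match
--         if pattern == h:
--             return True
--         # Substring match
--         if pattern in h: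
--             return True
--         # All words in header
--         header_words = set(h.split())
--         if pattern_words and pattern_words.issubset(header_words):
--             return True
--
--     return False
-- ===== SOURCE B (Python) =====
-- def _fuzzy_header_match(pattern: str, normalized_headers: set[str]) -> bool:
--     """Sequential passes: exact match via set membership, then a substring
--     scan, then a word-subset scan. Same result as the combined loop."""
--     pattern = pattern.lower().strip()
--     # Pass 1: exact match (set membership, no scan)
--     if pattern in normalized_headers:
--         return True
--     # Pass 2: substring scan
--     for h in normalized_headers:
--         if pattern in h:
--             return True
--     # Pass 3: word-subset scan
--     pattern_words = set(pattern.split())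
--     if pattern_words:
--         for h in normalized_headers:
--             if pattern_words.issubset(set(h.split())):
--                 return True
--     return False
-- ===== Notes on version B (the rewrite author's own statement) =====
-- stated objective: alternative
-- what changed: Replaced A's single loop testing three conditions per header with three sequential passes: an O(1) exact-match set lookup, then a substring-only scan, then a word-subset-only scan guarded by the empty-pattern-words check.
import Mathlib
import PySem

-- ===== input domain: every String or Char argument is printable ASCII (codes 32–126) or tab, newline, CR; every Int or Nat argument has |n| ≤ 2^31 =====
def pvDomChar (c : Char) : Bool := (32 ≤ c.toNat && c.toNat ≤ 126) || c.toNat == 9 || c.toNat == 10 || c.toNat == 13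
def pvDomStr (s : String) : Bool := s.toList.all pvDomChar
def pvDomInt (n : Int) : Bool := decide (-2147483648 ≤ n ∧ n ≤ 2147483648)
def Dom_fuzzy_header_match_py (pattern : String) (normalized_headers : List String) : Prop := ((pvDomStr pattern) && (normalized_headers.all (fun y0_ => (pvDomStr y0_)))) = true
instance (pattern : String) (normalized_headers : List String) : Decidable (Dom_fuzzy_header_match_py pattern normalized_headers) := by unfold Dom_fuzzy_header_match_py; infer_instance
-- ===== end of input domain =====

-- B replaces A's single three-condition loop by three sequential passes (set lookup, substring scan, word-subset scan); alternative decomposition, same cost.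

-- ===== PORT A =====
-- the word-subset test `pattern_words.issubset(set(h.split()))`
def pvSubsetW (pw : PySem.Set String) (h : String) : Bool :=
  pw.all (fun w => PySem.Set.contains (PySem.Set.ofList (PySem.Str.split₀ h)) w)

-- A's single `for h in normalized_headers` loop with its three early returns
def pvLoopA (p : String) (pw : PySem.Set String) : List String → Bool
  | [] => false
  | h :: rest =>
    if p == h then true
    else if PySem.Str.isIn p h then true
    else if decide (pw ≠ []) && pvSubsetW pw h then true
    else pvLoopA p pw rest

def fuzzy_header_match_py (pattern : String) (normalized_headers : List String) : Bool :=
  let p := PySem.Str.strip (PySem.Str.lower pattern)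
  let pw := PySem.Set.ofList (PySem.Str.split₀ p)
  pvLoopA p pw normalized_headers

-- ===== PORT B =====
-- pass 2: substring-only scan
def pvSubLoop (p : String) : List String → Bool
  | [] => false
  | h :: rest => if PySem.Str.isIn p h then true else pvSubLoop p rest

-- pass 3: word-subset-only scan
def pvWordLoop (pw : PySem.Set String) : List String → Bool
  | [] => false
  | h :: rest => if pvSubsetW pw h then true else pvWordLoop pw rest

def fuzzy_header_match_py_alt (pattern : String) (normalized_headers : List String) : Bool :=
  let p := PySem.Str.strip (PySem.Str.lower pattern)
  if PySem.Set.contains normalized_headers p then true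
  else if pvSubLoop p normalized_headers then true
  else
    let pw := PySem.Set.ofList (PySem.Str.split₀ p)
    if decide (pw ≠ []) then pvWordLoop pw normalized_headers
    else false

-- ===== PRECONDITION & SPEC =====
def Spec_fuzzy_header_match_py (pattern : String) (normalized_headers : List String) (out : Bool) : Prop := out = fuzzy_header_match_py_alt pattern normalized_headers
instance (pattern : String) (normalized_headers : List String) (out : Bool) : Decidable (Spec_fuzzy_header_match_py pattern normalized_headers out) := by unfold Spec_fuzzy_header_match_py; infer_instance

-- ===== CLAIM (what is proved, stated in full; the proofs are below) =====
def Claim_equal_fuzzy_header_match_py : Prop := ∀ (pattern : String) (normalized_headers : List String), Dom_fuzzy_header_match_py pattern normalized_headers → Spec_fuzzy_header_match_py pattern normalized_headers (fuzzy_header_match_py pattern normalized_headers)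

-- ===== LEMMAS AND PROOFS =====

theorem pvLoopA_iff (p : String) (pw : PySem.Set String) (l : List String) :
    pvLoopA p pw l = true ↔ ∃ h ∈ l, p = h ∨ PySem.Str.isIn p h = true ∨ (pw ≠ [] ∧ pvSubsetW pw h = true) := by
  induction l with
  | nil => simp [pvLoopA]
  | cons h rest ih =>
    simp only [pvLoopA]
    split_ifs with h1 h2 h3
    · simp only [true_iff]
      exact ⟨h, List.mem_cons_self, Or.inl (by simpa using h1)⟩
    · simp only [true_iff]
      exact ⟨h, List.mem_cons_self, Or.inr (Or.inl h2)⟩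
    · simp only [Bool.and_eq_true, decide_eq_true_eq] at h3
      simp only [true_iff]
      exact ⟨h, List.mem_cons_self, Or.inr (Or.inr ⟨h3.1, h3.2⟩)⟩
    · rw [ih]
      simp only [Bool.and_eq_true, decide_eq_true_eq, not_and_or, Bool.not_eq_true] at h3
      constructor
      · rintro ⟨g, hg, hc⟩; exact ⟨g, List.mem_cons_of_mem _ hg, hc⟩
      · rintro ⟨g, hg, hc⟩
        rcases List.mem_cons.mp hg with rfl | hg'
        · rcases hc with rfl | hc | ⟨hne, hw⟩
          · exact absurd (by simp : (p == p) = true) h1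
          · exact absurd hc h2
          · rcases h3 with h3 | h3
            · exact absurd hne h3
            · exact absurd hw (by simp [h3])
        · exact ⟨g, hg', hc⟩

theorem pvSubLoop_iff (p : String) (l : List String) :
    pvSubLoop p l = true ↔ ∃ h ∈ l, PySem.Str.isIn p h = true := by
  induction l with
  | nil => simp [pvSubLoop]
  | cons h rest ih =>
    simp only [pvSubLoop]
    split_ifs with h1
    · simp only [true_iff]
      exact ⟨h, List.mem_cons_self, h1⟩
    · rw [ih]
      constructor
      · rintro ⟨g, hg, hc⟩; exact ⟨g, List.mem_cons_of_mem _ hg, hc⟩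
      · rintro ⟨g, hg, hc⟩
        rcases List.mem_cons.mp hg with rfl | hg'
        · exact absurd hc h1
        · exact ⟨g, hg', hc⟩

theorem pvWordLoop_iff (pw : PySem.Set String) (l : List String) :
    pvWordLoop pw l = true ↔ ∃ h ∈ l, pvSubsetW pw h = true := by
  induction l with
  | nil => simp [pvWordLoop]
  | cons h rest ih =>
    simp only [pvWordLoop]
    split_ifs with h1
    · simp only [true_iff]
      exact ⟨h, List.mem_cons_self, h1⟩
    · rw [ih]
      constructor
      · rintro ⟨g, hg, hc⟩; exact ⟨g, List.mem_cons_of_mem _ hg, hc⟩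
      · rintro ⟨g, hg, hc⟩
        rcases List.mem_cons.mp hg with rfl | hg'
        · exact absurd hc h1
        · exact ⟨g, hg', hc⟩

-- `p == h` implies `p in h` (Python substring containment is reflexive)
theorem isIn_self (p : String) : PySem.Str.isIn p p = true := by
  simp [PySem.Chars.isIn_iff_infix]

theorem alt_iff (p : String) (pw : PySem.Set String) (l : List String) :
    (if PySem.Set.contains l p then true
     else if pvSubLoop p l then true
     else if decide (pw ≠ []) then pvWordLoop pw l else false) = true ↔
    (p ∈ l ∨ (∃ h ∈ l, PySem.Str.isIn p h = true) ∨ (pw ≠ [] ∧ ∃ h ∈ l, pvSubsetW pw h = true)) := by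
  split_ifs with h1 h2 h3
  · simp only [true_iff]
    exact Or.inl (by simpa [PySem.Set.contains_iff] using h1)
  · simp only [true_iff]
    exact Or.inr (Or.inl (pvSubLoop_iff p l |>.mp h2))
  · rw [pvWordLoop_iff]
    simp only [Bool.not_eq_true] at h1 h2
    constructor
    · intro hw
      exact Or.inr (Or.inr ⟨of_decide_eq_true h3, hw⟩)
    · rintro (hmem | hs | ⟨_, hw⟩)
      · have hc : PySem.Set.contains l p = true := by
          rw [PySem.Set.contains_iff]; exact hmem
        rw [h1] at hc; exact absurd hc (by simp)
      · rw [pvSubLoop_iff p l |>.mpr hs] at h2; exact absurd h2 (by simp)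
      · exact hw
  · simp only [false_iff, not_or, not_and]
    simp only [Bool.not_eq_true] at h1 h2
    simp only [decide_eq_true_eq, not_not] at h3
    refine ⟨?_, ?_, ?_⟩
    · intro hmem
      have hc : PySem.Set.contains l p = true := by
        rw [PySem.Set.contains_iff]; exact hmem
      rw [h1] at hc; exact absurd hc (by simp)
    · intro hs
      rw [pvSubLoop_iff p l |>.mpr hs] at h2; exact absurd h2 (by simp)
    · intro hne _
      exact hne h3

-- ===== VERDICT (by name: the statement is the Claim_ definition above) =====
theorem fuzzy_header_match_py_spec : Claim_equal_fuzzy_header_match_py := by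
  intro pattern normalized_headers _
  unfold Spec_fuzzy_header_match_py fuzzy_header_match_py fuzzy_header_match_py_alt
  set p := PySem.Str.strip (PySem.Str.lower pattern) with hp
  set pw := PySem.Set.ofList (PySem.Str.split₀ p) with hpw
  rw [Bool.eq_iff_iff, pvLoopA_iff, alt_iff]
  constructor
  · rintro ⟨h, hmem, rfl | hin | ⟨hne, hw⟩⟩
    · exact Or.inl hmem
    · exact Or.inr (Or.inl ⟨h, hmem, hin⟩)
    · exact Or.inr (Or.inr ⟨hne, h, hmem, hw⟩)
  · rintro (hmem | ⟨h, hmem, hin⟩ | ⟨hne, h, hmem, hw⟩)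
    · exact ⟨p, hmem, Or.inr (Or.inl (isIn_self p))⟩
    · exact ⟨h, hmem, Or.inr (Or.inl hin)⟩
    · exact ⟨h, hmem, Or.inr (Or.inr ⟨hne, hw⟩)⟩
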